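-- pv_equiv track=rewrite | github.com/cassiobarth/analise-capital-cognitivo-brasil | src/cog/cog_03_process_unified_saeb_pypeline.py | get_quantity_column
-- ===== SOURCE A (Python) =====
-- def get_quantity_column(header, grade):
--     """
--     [NEW] Robust brute-force search for Student Count column.
--     """
--     header_upper = {h.upper(): h for h in header}
--
--     candidates = [
--         f"NU_PRESENTES_{grade}",      # Padrão 2015/2017
--         f"NU_PRESENTES_{grade}_LP",   # Padrão 2019+
--         f"QTD_ALUNOS_{grade}",
--         f"N_ALUNOS_{grade}",
--         "NU_PRESENTES",
--         # Variações específicas para 3EM (as vezes 'EM')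
--         f"NU_PRESENTES_EM" if grade == '3EM' else "X_IGNORE",
--         f"NU_PRESENTES_EM_LP" if grade == '3EM' else "X_IGNORE"
--     ]
--
--     for cand in candidates:
--         if cand in header_upper:
--             return header_upper[cand]
--     return None
-- ===== SOURCE B (Python) =====
-- def get_quantity_column(header, grade):
--     """
--     Single pass over the header: rank each candidate column name by
--     priority, then keep the header column whose ranking is best
--     (on equal rank the later column wins).
--     """
--     candidates = [
--         f"NU_PRESENTES_{grade}",
--         f"NU_PRESENTES_{grade}_LP",
--         f"QTD_ALUNOS_{grade}",
--         f"N_ALUNOS_{grade}",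
--         "NU_PRESENTES",
--         "NU_PRESENTES_EM" if grade == '3EM' else "X_IGNORE",
--         "NU_PRESENTES_EM_LP" if grade == '3EM' else "X_IGNORE",
--     ]
--     rank = {}
--     for i, name in enumerate(candidates):
--         rank.setdefault(name, i)
--
--     best = None
--     best_rank = len(candidates)
--     for h in header:
--         r = rank.get(h.upper())
--         if r is not None and r <= best_rank:
--             best, best_rank = h, r
--     return best
-- ===== Notes on version B (the rewrite author's own statement) =====
-- stated objective: alternative
-- what changed: Inverts the traversal: instead of probing candidate names against a precomputed uppercase->original header dict, B builds a candidate->priority rank table once and makes a single argmin pass over the header, keeping the best-ranked (ties: latest) column.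
import Mathlib
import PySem

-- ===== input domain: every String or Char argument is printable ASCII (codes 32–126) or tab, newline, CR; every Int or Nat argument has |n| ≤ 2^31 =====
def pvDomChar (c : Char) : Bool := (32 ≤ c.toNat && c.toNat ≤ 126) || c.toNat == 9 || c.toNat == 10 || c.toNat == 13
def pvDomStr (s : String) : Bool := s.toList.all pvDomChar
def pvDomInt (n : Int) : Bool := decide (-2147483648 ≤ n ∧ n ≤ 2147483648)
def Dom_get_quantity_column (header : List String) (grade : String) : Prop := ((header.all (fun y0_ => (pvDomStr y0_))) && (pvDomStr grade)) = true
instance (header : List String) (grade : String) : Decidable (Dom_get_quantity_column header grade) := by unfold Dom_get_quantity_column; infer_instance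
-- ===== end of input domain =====

-- B inverts the traversal: a candidate->priority rank table plus one argmin pass over the
-- header (ties to the later column), instead of A's uppercase->column dict probed per candidate.


-- ===== PORT A =====
-- header_upper = {h.upper(): h for h in header}
def gqcHeaderUpper (header : List String) : PySem.Dict String String :=
  header.foldl (fun d h => d.insert (PySem.Str.upper h) h) PySem.Dict.empty

def gqcCandidatesA (grade : String) : List String :=
  [ "NU_PRESENTES_" ++ grade
  , "NU_PRESENTES_" ++ grade ++ "_LP"
  , "QTD_ALUNOS_" ++ grade
  , "N_ALUNOS_" ++ grade
  , "NU_PRESENTES"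
  , if grade = "3EM" then "NU_PRESENTES_EM" else "X_IGNORE"
  , if grade = "3EM" then "NU_PRESENTES_EM_LP" else "X_IGNORE" ]

-- for cand in candidates: if cand in header_upper: return header_upper[cand]
def gqcLoopA (d : PySem.Dict String String) : List String → Option String
  | [] => none
  | cand :: rest => if d.contains cand then d.get? cand else gqcLoopA d rest

def get_quantity_column (header : List String) (grade : String) : Option String :=
  gqcLoopA (gqcHeaderUpper header) (gqcCandidatesA grade)

-- ===== PORT B =====
def gqcCandidatesB (grade : String) : List String :=
  [ "NU_PRESENTES_" ++ grade
  , "NU_PRESENTES_" ++ grade ++ "_LP"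
  , "QTD_ALUNOS_" ++ grade
  , "N_ALUNOS_" ++ grade
  , "NU_PRESENTES"
  , if grade = "3EM" then "NU_PRESENTES_EM" else "X_IGNORE"
  , if grade = "3EM" then "NU_PRESENTES_EM_LP" else "X_IGNORE" ]

-- rank = {}; for i, name in enumerate(candidates): rank.setdefault(name, i)
def gqcRankB (cands : List String) : PySem.Dict String Int :=
  (PySem.List.enumerate cands).foldl (fun d ic => d.setdefault ic.2 ic.1) PySem.Dict.empty

-- r = rank.get(h.upper()); if r is not None and r <= best_rank: best, best_rank = h, r
def gqcStepB (rank : PySem.Dict String Int) (acc : Option String × Int) (h : String) : Option String × Int :=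
  match rank.get? (PySem.Str.upper h) with
  | some r => if r ≤ acc.2 then (some h, r) else acc
  | none => acc

def get_quantity_column_alt (header : List String) (grade : String) : Option String :=
  (header.foldl (gqcStepB (gqcRankB (gqcCandidatesB grade)))
    (none, ((gqcCandidatesB grade).length : Int))).1

-- ===== PRECONDITION & SPEC =====
def Spec_get_quantity_column (header : List String) (grade : String) (out : Option String) : Prop := out = get_quantity_column_alt header grade
instance (header : List String) (grade : String) (out : Option String) : Decidable (Spec_get_quantity_column header grade out) := by unfold Spec_get_quantity_column; infer_instance

-- ===== CLAIM (what is proved, stated in full; the proofs are below) =====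
def Claim_equal_get_quantity_column : Prop := ∀ (header : List String) (grade : String), Dom_get_quantity_column header grade → Spec_get_quantity_column header grade (get_quantity_column header grade)

-- ===== LEMMAS AND PROOFS =====

-- Common characterisation: first candidate (in order) that some header column matches
-- (case-insensitively), returning the LAST such column.
def gqcFirstCand (header : List String) : List String → Option String
  | [] => none
  | c :: rest =>
      match header.reverse.find? (fun h => PySem.Str.upper h == c) with
      | some h => some h
      | none => gqcFirstCand header rest

-- index of the first candidate matched by some header column (= length if none)
def gqcMinIdx (header : List String) : List String → Nat
  | [] => 0
  | c :: rest => if header.any (fun h => PySem.Str.upper h == c) then 0 else gqcMinIdx header rest + 1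

-- first-occurrence index
def gqcIdx? (s : String) : List String → Option Nat
  | [] => none
  | c :: rest => if c = s then some 0 else (gqcIdx? s rest).map (· + 1)

---------------------------------------------------------------------------
-- A-side: the dict built by A answers exactly what a backwards scan finds.
theorem gqc_get?_eq_scan (header : List String) (d : PySem.Dict String String) (k : String) :
    (header.foldl (fun d h => d.insert (PySem.Str.upper h) h) d).get? k =
      (header.reverse.find? (fun h => PySem.Str.upper h == k)).or (d.get? k) := by
  induction header generalizing d with
  | nil => simp
  | cons h t ih =>
      simp only [List.foldl_cons, List.reverse_cons, List.find?_append, ih,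
        PySem.Dict.get?_insert]
      cases hfind : t.reverse.find? (fun h => PySem.Str.upper h == k) with
      | some v => simp
      | none =>
          by_cases hk : PySem.Str.upper h = k
          · simp [List.find?, hk]
          · have : (PySem.Str.upper h == k) = false := by simp [hk]
            simp [List.find?, this, Ne.symm hk]

theorem gqc_A_eq_firstCand (header : List String) (cands : List String) :
    gqcLoopA (gqcHeaderUpper header) cands = gqcFirstCand header cands := by
  induction cands with
  | nil => rfl
  | cons c rest ih =>
      have hget : (gqcHeaderUpper header).get? c =
          header.reverse.find? (fun h => PySem.Str.upper h == c) := by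
        simpa [gqcHeaderUpper] using gqc_get?_eq_scan header PySem.Dict.empty c
      simp only [gqcLoopA, gqcFirstCand, PySem.Dict.contains_eq_isSome_get?, hget, ih]
      cases header.reverse.find? (fun h => PySem.Str.upper h == c) <;> simp

---------------------------------------------------------------------------
-- B-side: the rank table is the first-occurrence index.
theorem gqc_rank_get?_aux (s : String) (cands : List String) :
    ∀ (n : Int) (d : PySem.Dict String Int),
      ((PySem.List.enumerate cands n).foldl (fun d ic => d.setdefault ic.2 ic.1) d).get? s =
        (d.get? s).or ((gqcIdx? s cands).map (fun i => Int.ofNat i + n)) := by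
  induction cands with
  | nil => intro n d; simp [PySem.List.enumerate_nil, gqcIdx?]
  | cons c rest ih =>
      intro n d
      rw [PySem.List.enumerate_cons, List.foldl_cons, ih]
      dsimp only
      by_cases hc : c = s
      · subst hc
        rw [PySem.Dict.get?_setdefault_self]
        cases hd : d.get? c <;> simp [gqcIdx?]
      · rw [PySem.Dict.get?_setdefault_of_ne d n (show s ≠ c from fun h => hc h.symm)]
        simp only [gqcIdx?, if_neg hc, Option.map_map]
        cases gqcIdx? s rest with
        | none => simp
        | some i =>
            simp only [Option.map_some, Function.comp]
            have : Int.ofNat (i + 1) + n = Int.ofNat i + (n + 1) := by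
              rw [Int.ofNat_eq_natCast, Int.ofNat_eq_natCast]; push_cast; ring
            rw [this]

theorem gqc_rank_get? (cands : List String) (s : String) :
    (gqcRankB cands).get? s = (gqcIdx? s cands).map (fun i => Int.ofNat i) := by
  rw [gqcRankB, gqc_rank_get?_aux]
  cases gqcIdx? s cands <;> simp

---------------------------------------------------------------------------
-- appending one column to the header
theorem gqc_minIdx_nil (cands : List String) : gqcMinIdx [] cands = cands.length := by
  induction cands with
  | nil => rfl
  | cons c rest ih => simp [gqcMinIdx, ih]

theorem gqc_firstCand_nil (cands : List String) : gqcFirstCand [] cands = none := by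
  induction cands with
  | nil => rfl
  | cons c rest ih => simp [gqcFirstCand, ih]

theorem gqc_append_none (t : List String) (x : String) (cands : List String)
    (h : gqcIdx? (PySem.Str.upper x) cands = none) :
    gqcFirstCand (t ++ [x]) cands = gqcFirstCand t cands ∧
      gqcMinIdx (t ++ [x]) cands = gqcMinIdx t cands := by
  induction cands with
  | nil => exact ⟨rfl, rfl⟩
  | cons c rest ih =>
      simp only [gqcIdx?] at h
      split_ifs at h with hc
      have hx : (PySem.Str.upper x == c) = false := by
        simp; intro he; exact hc he.symm
      have hrest := ih (by simpa using h)
      constructor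
      · simp only [gqcFirstCand, List.reverse_append, List.reverse_singleton,
          List.singleton_append, List.find?_cons, hx, hrest.1]
      · simp only [gqcMinIdx, List.any_append, List.any_cons, List.any_nil, hx,
          Bool.or_false, hrest.2]

theorem gqc_append_le (t : List String) (x : String) (cands : List String) :
    ∀ (r : Nat), gqcIdx? (PySem.Str.upper x) cands = some r → r ≤ gqcMinIdx t cands →
    gqcFirstCand (t ++ [x]) cands = some x ∧ gqcMinIdx (t ++ [x]) cands = r := by
  induction cands with
  | nil => intro r h; cases h
  | cons c rest ih =>
      intro r h hle
      simp only [gqcIdx?] at h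
      split_ifs at h with hc
      · cases h
        subst hc
        constructor
        · simp [gqcFirstCand]
        · simp [gqcMinIdx, List.any_append]
      · cases hr : gqcIdx? (PySem.Str.upper x) rest with
        | none => simp [hr] at h
        | some r' =>
            rw [hr] at h; cases h
            have hx : (PySem.Str.upper x == c) = false := by
              simp; intro he; exact hc he.symm
            simp only [gqcMinIdx] at hle
            split_ifs at hle with hany
            · omega
            · have hall : ∀ a ∈ t, ¬ PySem.Str.upper a = c := by simpa using hany
              have hrest := ih r' hr (by omega)
              have hfnone : t.reverse.find? (fun h => PySem.Str.upper h == c) = none := by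
                rw [List.find?_eq_none]
                intro a ha
                simpa using hall a (List.mem_reverse.mp ha)
              constructor
              · simp only [gqcFirstCand, List.reverse_append, List.reverse_singleton,
                  List.singleton_append, List.find?_cons, hx, hfnone, hrest.1]
              · simp [gqcMinIdx, List.any_append, hx, (by simpa using hany :
                  (t.any fun h => PySem.Str.upper h == c) = false), hrest.2]

theorem gqc_append_gt (t : List String) (x : String) (cands : List String) :
    ∀ (r : Nat), gqcIdx? (PySem.Str.upper x) cands = some r → gqcMinIdx t cands < r →
    gqcFirstCand (t ++ [x]) cands = gqcFirstCand t cands ∧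
      gqcMinIdx (t ++ [x]) cands = gqcMinIdx t cands := by
  induction cands with
  | nil => intro r h; cases h
  | cons c rest ih =>
      intro r h hgt
      simp only [gqcIdx?] at h
      split_ifs at h with hc
      · cases h; omega
      · cases hr : gqcIdx? (PySem.Str.upper x) rest with
        | none => simp [hr] at h
        | some r' =>
            rw [hr] at h; cases h
            have hx : (PySem.Str.upper x == c) = false := by
              simp; intro he; exact hc he.symm
            simp only [gqcMinIdx] at hgt ⊢
            by_cases hany : (t.any fun h => PySem.Str.upper h == c) = true
            · cases hfind : t.reverse.find? (fun h => PySem.Str.upper h == c) with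
              | none =>
                  exfalso
                  rw [List.find?_eq_none] at hfind
                  obtain ⟨a, ha, hpa⟩ := List.any_eq_true.mp hany
                  exact absurd hpa (by simpa using hfind a (List.mem_reverse.mpr ha))
              | some hh =>
                  constructor
                  · simp only [gqcFirstCand, List.reverse_append, List.reverse_singleton,
                      List.singleton_append, List.find?_cons, hx, hfind]
                  · simp [List.any_append, hany]
            · have hany' : (t.any fun h => PySem.Str.upper h == c) = false := by
                simpa using hany
              rw [if_neg (by simp [hany'])] at hgt
              have hall : ∀ a ∈ t, ¬ PySem.Str.upper a = c := by simpa using hany'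
              have hrest := ih r' hr (by omega)
              have hfnone : t.reverse.find? (fun h => PySem.Str.upper h == c) = none := by
                rw [List.find?_eq_none]
                intro a ha
                simpa using hall a (List.mem_reverse.mp ha)
              constructor
              · simp only [gqcFirstCand, List.reverse_append, List.reverse_singleton,
                  List.singleton_append, List.find?_cons, hx, hfnone, hrest.1]
              · simp [List.any_append, hx, hany', hrest.2]

---------------------------------------------------------------------------
-- the single argmin pass computes (first matched candidate's last column, its index)
theorem gqc_fold_spec (cands : List String) (t : List String) :
    t.foldl (gqcStepB (gqcRankB cands)) (none, (cands.length : Int)) =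
      (gqcFirstCand t cands, (gqcMinIdx t cands : Int)) := by
  induction t using List.reverseRecOn with
  | nil => simp [gqc_firstCand_nil, gqc_minIdx_nil]
  | append_singleton t x ih =>
      rw [List.foldl_append, List.foldl_cons, List.foldl_nil, ih]
      unfold gqcStepB
      rw [gqc_rank_get?]
      cases hr : gqcIdx? (PySem.Str.upper x) cands with
      | none =>
          obtain ⟨h1, h2⟩ := gqc_append_none t x cands hr
          simp [h1, h2]
      | some r =>
          simp only [Option.map_some]
          by_cases hle : r ≤ gqcMinIdx t cands
          · obtain ⟨h1, h2⟩ := gqc_append_le t x cands r hr hle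
            rw [if_pos (by rw [Int.ofNat_eq_natCast]; exact_mod_cast hle)]
            simp [h1, h2]
          · obtain ⟨h1, h2⟩ := gqc_append_gt t x cands r hr (by omega)
            rw [if_neg (by rw [Int.ofNat_eq_natCast]; intro hh; exact hle (by exact_mod_cast hh))]
            simp [h1, h2]

-- ===== VERDICT (by name: the statement is the Claim_ definition above) =====
theorem get_quantity_column_spec : Claim_equal_get_quantity_column := by
  intro header grade _
  show get_quantity_column header grade = get_quantity_column_alt header grade
  have hc : gqcCandidatesA grade = gqcCandidatesB grade := rfl
  rw [get_quantity_column, get_quantity_column_alt, gqc_fold_spec, hc,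
    gqc_A_eq_firstCand]
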